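-- pv_equiv track=rewrite | github.com/AbdeHelala/bioinformatics-projects | python2024-main/assignments/assignments_03.py | solve
-- ===== SOURCE A (Python) =====
-- def solve(n, operations):
--     current_value = n
--     ops = operations.split()
--
--     i = 0
--     while i < len(ops):
--         operation = ops[i]
--         value = int(ops[i + 1])
--
--         match operation:
--             case 'add':
--                 current_value += value
--             case 'mul':
--                 current_value *= value
--             case 'div':
--                 current_value //= value
--             case 'mod':
--                 current_value %= value
--
--
--         i += 2
--
--     return current_value
-- ===== SOURCE B (Python) =====
-- def solve(n, operations):
--     toks = operations.split()
--     # Deferred affine transform: the pending effect on the value is x -> m*x + c.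
--     # add/mul (and unknown ops) only rewrite the coefficients; the transform is
--     # materialised only at div/mod (where affinity breaks) and at the end.
--     m, c = 1, 0
--     x = n
--     i = 0
--     while i < len(toks):
--         op = toks[i]
--         v = int(toks[i + 1])
--         if op == 'add':
--             c += v
--         elif op == 'mul':
--             m *= v
--             c *= v
--         elif op == 'div':
--             x = (m * x + c) // v
--             m, c = 1, 0
--         elif op == 'mod':
--             x = (m * x + c) % v
--             m, c = 1, 0
--         i += 2
--     return m * x + c
-- ===== Notes on version B (the rewrite author's own statement) =====
-- stated objective: alternative
-- what changed: Instead of updating the running value at every step, B keeps a deferred affine transform x -> m*x + c: add/mul (and unknown ops) only rewrite the coefficients, and the transform is applied to the value only at div/mod barriers (where affinity breaks) and once at the end.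
import Mathlib
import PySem

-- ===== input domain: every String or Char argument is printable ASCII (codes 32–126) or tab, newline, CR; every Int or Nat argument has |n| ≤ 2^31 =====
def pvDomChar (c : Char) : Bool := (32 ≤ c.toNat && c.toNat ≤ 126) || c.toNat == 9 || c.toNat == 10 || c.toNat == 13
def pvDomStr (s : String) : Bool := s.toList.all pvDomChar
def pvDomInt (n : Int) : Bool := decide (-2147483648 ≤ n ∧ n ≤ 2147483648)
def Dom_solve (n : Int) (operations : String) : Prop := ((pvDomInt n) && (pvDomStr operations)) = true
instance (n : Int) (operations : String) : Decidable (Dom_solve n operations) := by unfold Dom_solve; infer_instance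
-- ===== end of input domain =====

-- B replaces A's step-by-step value updates with a deferred affine transform x -> m*x + c,
-- applied only at div/mod barriers and at the end (objective: alternative; same cost).


-- ===== PORT A =====
-- while loop of A, index i stepping by 2; ops[i+1]/int()/div-by-0 raise in Python — those
-- inputs are excluded by Pre_solve, the port uses defaults there (pyGetD "", getD 0, total floordiv/mod).
def solveLoop (ops : List String) (i : Nat) (cur : Int) : Int :=
  if h : i < ops.length then
    let operation := PySem.List.pyGetD ops (i : Int) ""
    let value := (PySem.Int.ofStr? (PySem.List.pyGetD ops ((i : Int) + 1) "")).getD 0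
    let cur' :=
      if operation = "add" then cur + value
      else if operation = "mul" then cur * value
      else if operation = "div" then PySem.Int.floordiv cur value
      else if operation = "mod" then PySem.Int.mod cur value
      else cur
    solveLoop ops (i + 2) cur'
  else cur
termination_by ops.length - i
decreasing_by omega

def solve (n : Int) (operations : String) : Int :=
  solveLoop (PySem.Str.split₀ operations) 0 n

-- ===== PORT B =====
-- Source B's while loop: state is the pending affine map (m, c) and the value x;
-- add/mul/unknown touch only (m, c); div/mod materialise m*x+c; result is m*x+c.
def solveAltLoop (toks : List String) (i : Nat) (m c x : Int) : Int :=
  if h : i < toks.length then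
    let op := PySem.List.pyGetD toks (i : Int) ""
    let v := (PySem.Int.ofStr? (PySem.List.pyGetD toks ((i : Int) + 1) "")).getD 0
    if op = "add" then solveAltLoop toks (i + 2) m (c + v) x
    else if op = "mul" then solveAltLoop toks (i + 2) (m * v) (c * v) x
    else if op = "div" then solveAltLoop toks (i + 2) 1 0 (PySem.Int.floordiv (m * x + c) v)
    else if op = "mod" then solveAltLoop toks (i + 2) 1 0 (PySem.Int.mod (m * x + c) v)
    else solveAltLoop toks (i + 2) m c x
  else m * x + c
termination_by toks.length - i
decreasing_by all_goals omega

def solve_alt (n : Int) (operations : String) : Int :=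
  solveAltLoop (PySem.Str.split₀ operations) 0 1 0 n

-- ===== PRECONDITION & SPEC =====
-- chunk a token list into consecutive (op, value) pairs (for stating Pre_ only)
def pvChunks : List String → List (String × String)
  | a :: b :: rest => (a, b) :: pvChunks rest
  | _ => []

-- Pre_solve = exactly where the Python A returns: an even number of tokens, every value token
-- parses as an int, and no 'div'/'mod' with value 0 (otherwise IndexError/ValueError/ZeroDivisionError).
def Pre_solve (n : Int) (operations : String) : Prop :=
  (PySem.Str.split₀ operations).length % 2 = 0 ∧
  ∀ p ∈ pvChunks (PySem.Str.split₀ operations),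
    (PySem.Int.ofStr? p.2).isSome = true ∧
    ((p.1 = "div" ∨ p.1 = "mod") → PySem.Int.ofStr? p.2 ≠ some 0)
instance (n : Int) (operations : String) : Decidable (Pre_solve n operations) := by
  unfold Pre_solve; infer_instance

def pvWitness_solve : Int × String := (5, "add 3 mul -2 div 4 mod 3")

def Spec_solve (n : Int) (operations : String) (out : Int) : Prop := out = solve_alt n operations
instance (n : Int) (operations : String) (out : Int) : Decidable (Spec_solve n operations out) := by unfold Spec_solve; infer_instance

-- ===== CLAIM (what is proved, stated in full; the proofs are below) =====
def Claim_equal_solve : Prop := ∀ (n : Int) (operations : String), Dom_solve n operations → Pre_solve n operations → Spec_solve n operations (solve n operations)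

-- ===== LEMMAS AND PROOFS =====

-- invariant: B's loop with pending map (m, c) and value x equals A's loop run on m*x + c
lemma solveAltLoop_eq (toks : List String) (i : Nat) (m c x : Int) :
    solveAltLoop toks i m c x = solveLoop toks i (m * x + c) := by
  by_cases h : i < toks.length
  · rw [solveAltLoop, dif_pos h, solveLoop, dif_pos h]
    simp only
    set op := PySem.List.pyGetD toks (i : Int) "" with hop
    set v := (PySem.Int.ofStr? (PySem.List.pyGetD toks ((i : Int) + 1) "")).getD 0 with hv
    split_ifs with h1 h2 h3 h4
    · rw [solveAltLoop_eq]; ring_nf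
    · rw [solveAltLoop_eq]; ring_nf
    · rw [solveAltLoop_eq]; ring_nf
    · rw [solveAltLoop_eq]; ring_nf
    · exact solveAltLoop_eq toks (i + 2) m c x
  · rw [solveAltLoop, dif_neg h, solveLoop, dif_neg h]
termination_by toks.length - i
decreasing_by all_goals omega

-- ===== VERDICT (by name: the statement is the Claim_ definition above) =====
theorem solve_spec : Claim_equal_solve := by
  intro n operations _ _
  unfold Spec_solve solve solve_alt
  rw [solveAltLoop_eq]
  ring_nf
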